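-- pv_equiv track=rewrite | github.com/mgao97/C-S | CorrectAndSmooth/run_experiments_twibot22.py | bfs_subgraph
-- ===== SOURCE A (Python) =====
-- from collections import deque
--
-- def bfs_subgraph(edge_list, start_node, k):
--     graph = {}
--     for edge in edge_list:
--         src, dest, _ = edge
--         if src not in graph:
--             graph[src] = []
--         graph[src].append(dest)
--
--     visited = set()
--     subgraph_nodes = set()
--     subgraph_edges = []
--     queue = deque([start_node])
--     while queue and len(subgraph_nodes) < k:
--         node = queue.popleft()
--         if node not in visited:
--             visited.add(node)
--             subgraph_nodes.add(node)
--             if node in graph: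
--                 for neighbor in graph[node]:
--                     subgraph_edges.append((node, neighbor))
--                     if neighbor not in visited:
--                         queue.append(neighbor)
--     return subgraph_edges
-- ===== SOURCE B (Python) =====
-- from collections import deque
--
-- def bfs_subgraph(edge_list, start_node, k):
--     graph = {}
--     for src, dest, _ in edge_list:
--         graph.setdefault(src, []).append(dest)
--
--     # Phase 1: BFS that marks nodes when ENQUEUED (the queue never holds
--     # duplicates), recording only the processing order of the nodes.
--     order = []
--     count = 0
--     seen = {start_node}
--     queue = deque([start_node])
--     while queue and count < k:
--         node = queue.popleft()
--         order.append(node)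
--         count += 1
--         for nb in graph.get(node, []):
--             if nb not in seen:
--                 seen.add(nb)
--                 queue.append(nb)
--
--     # Phase 2: emit every outgoing edge of each processed node, in order.
--     edges = []
--     for node in order:
--         for nb in graph.get(node, []):
--             edges.append((node, nb))
--     return edges
-- ===== Notes on version B (the rewrite author's own statement) =====
-- stated objective: alternative
-- what changed: B replaces A's BFS (which enqueues duplicates and filters them with a visited-check at pop time, appending edges inline) by a mark-on-enqueue BFS whose seen-set keeps the queue duplicate-free, recording only the processing order, and emits all edges in a separate second pass over that order; the adjacency dict is built with setdefault.
import Mathlib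
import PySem

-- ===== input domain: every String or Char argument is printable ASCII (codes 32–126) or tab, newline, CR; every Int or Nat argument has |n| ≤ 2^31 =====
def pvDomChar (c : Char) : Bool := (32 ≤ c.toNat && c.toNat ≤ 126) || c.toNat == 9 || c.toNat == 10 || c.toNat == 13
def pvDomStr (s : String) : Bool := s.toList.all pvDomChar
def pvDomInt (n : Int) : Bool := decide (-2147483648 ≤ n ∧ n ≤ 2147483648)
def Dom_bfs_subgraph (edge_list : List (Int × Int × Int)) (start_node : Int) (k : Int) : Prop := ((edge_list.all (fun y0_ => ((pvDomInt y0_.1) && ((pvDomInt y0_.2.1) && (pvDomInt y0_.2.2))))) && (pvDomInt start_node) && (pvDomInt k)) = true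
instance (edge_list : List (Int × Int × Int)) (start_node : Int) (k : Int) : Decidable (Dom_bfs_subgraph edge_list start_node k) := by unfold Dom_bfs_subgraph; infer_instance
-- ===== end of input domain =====

-- B re-implements the BFS with a mark-on-enqueue seen-set (the queue never holds
-- duplicate entries and pops need no visited check) and emits the edges in a
-- separate second pass over the recorded processing order; same return value.

-- ===== PORT A =====
-- graph = {}; for src, dest, _ in edge_list: if src not in graph: graph[src] = []; graph[src].append(dest)
def pvStepA (g : PySem.Dict Int (List Int)) (e : Int × Int × Int) : PySem.Dict Int (List Int) :=
  let g := if g.contains e.1 then g else g.insert e.1 []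
  g.modify e.1 [] (· ++ [e.2.1])

-- while queue and len(subgraph_nodes) < k: … (fuel bounds the number of pops; see bfs_subgraph)
def pvLoopA (graph : PySem.Dict Int (List Int)) (k : Int) :
    Nat → List Int → PySem.Set Int → PySem.Set Int → List (Int × Int) → List (Int × Int)
  | 0, _, _, _, acc => acc
  | fuel + 1, queue, visited, snodes, acc =>
    match queue with
    | [] => acc
    | node :: rest =>
      if ((PySem.Set.len snodes : Int) < k) then
        if PySem.Set.contains visited node then
          pvLoopA graph k fuel rest visited snodes acc
        else
          let visited' := PySem.Set.add visited node
          let snodes' := PySem.Set.add snodes node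
          match PySem.Dict.get? graph node with
          | none => pvLoopA graph k fuel rest visited' snodes' acc
          | some nbrs =>
            -- for neighbor in graph[node]: subgraph_edges.append(…); if neighbor not in visited: queue.append(neighbor)
            let st := nbrs.foldl
              (fun (st : List Int × List (Int × Int)) b =>
                (if PySem.Set.contains visited' b then st.1 else st.1 ++ [b],
                 st.2 ++ [(node, b)]))
              (rest, acc)
            pvLoopA graph k fuel st.1 visited' snodes' st.2
      else acc

def bfs_subgraph (edge_list : List (Int × Int × Int)) (start_node : Int) (k : Int) : List (Int × Int) :=
  let graph := edge_list.foldl pvStepA PySem.Dict.empty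
  pvLoopA graph k (edge_list.length + 1) [start_node] PySem.Set.empty PySem.Set.empty []

-- ===== PORT B =====
-- graph.setdefault(src, []).append(dest)
def pvStepB (g : PySem.Dict Int (List Int)) (e : Int × Int × Int) : PySem.Dict Int (List Int) :=
  (g.setdefault e.1 []).modify e.1 [] (· ++ [e.2.1])

-- phase 1: BFS recording only the processing order; nodes are marked seen when ENQUEUED
def pvLoopB (graph : PySem.Dict Int (List Int)) (k : Int) :
    Nat → List Int → PySem.Set Int → List Int → Int → List Int
  | 0, _, _, order, _ => order
  | fuel + 1, queue, seen, order, count =>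
    match queue with
    | [] => order
    | node :: rest =>
      if (count < k) then
        let order' := order ++ [node]
        -- for nb in graph.get(node, []): if nb not in seen: seen.add(nb); queue.append(nb)
        let st := (PySem.Dict.getD graph node []).foldl
          (fun (st : List Int × PySem.Set Int) nb =>
            if PySem.Set.contains st.2 nb then st else (st.1 ++ [nb], PySem.Set.add st.2 nb))
          (rest, seen)
        pvLoopB graph k fuel st.1 st.2 order' (count + 1)
      else order

def bfs_subgraph_alt (edge_list : List (Int × Int × Int)) (start_node : Int) (k : Int) : List (Int × Int) :=
  let graph := edge_list.foldl pvStepB PySem.Dict.empty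
  let order := pvLoopB graph k (edge_list.length + 1) [start_node]
    (PySem.Set.add PySem.Set.empty start_node) [] 0
  -- phase 2: for node in order: for nb in graph.get(node, []): edges.append((node, nb))
  order.foldl (fun acc node =>
    (PySem.Dict.getD graph node []).foldl (fun a nb => a ++ [(node, nb)]) acc) []

-- ===== PRECONDITION & SPEC =====
def Spec_bfs_subgraph (edge_list : List (Int × Int × Int)) (start_node : Int) (k : Int) (out : List (Int × Int)) : Prop := out = bfs_subgraph_alt edge_list start_node k
instance (edge_list : List (Int × Int × Int)) (start_node : Int) (k : Int) (out : List (Int × Int)) : Decidable (Spec_bfs_subgraph edge_list start_node k out) := by unfold Spec_bfs_subgraph; infer_instance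

-- ===== CLAIM (what is proved, stated in full; the proofs are below) =====
def Claim_equal_bfs_subgraph : Prop := ∀ (edge_list : List (Int × Int × Int)) (start_node : Int) (k : Int), Dom_bfs_subgraph edge_list start_node k → Spec_bfs_subgraph edge_list start_node k (bfs_subgraph edge_list start_node k)

-- ===== LEMMAS AND PROOFS =====

-- neighbours of n in edge-list order (what graph[n] holds after the build loop)
def pvNbrs (el : List (Int × Int × Int)) (n : Int) : List Int :=
  el.filterMap (fun e => if e.1 = n then some e.2.1 else none)

-- first occurrences of the elements of a list that avoid a set (B's queue discipline)
def pvDedup (v : PySem.Set Int) : List Int → List Int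
  | [] => []
  | x :: xs => if PySem.Set.contains v x then pvDedup v xs else x :: pvDedup (PySem.Set.add v x) xs

-- termination potential of the BFS
def pvPhi (el : List (Int × Int × Int)) (q : List Int) (v : PySem.Set Int) : Nat :=
  q.length + el.countP (fun e => !PySem.Set.contains v e.1)

-- the edges emitted for a processing order
def pvEmit (graph : PySem.Dict Int (List Int)) (order : List Int) : List (Int × Int) :=
  order.flatMap (fun n => (PySem.Dict.getD graph n []).map (fun b => (n, b)))

theorem pvContains_eq_false {v : PySem.Set Int} {x : Int} (h : x ∉ v) :
    PySem.Set.contains v x = false := by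
  simpa [PySem.Set.contains_iff] using h

theorem pvContains_eq_true {v : PySem.Set Int} {x : Int} (h : x ∈ v) :
    PySem.Set.contains v x = true := by
  simpa [PySem.Set.contains_iff] using h

theorem pvDedup_cons_mem {v : PySem.Set Int} {x : Int} (h : x ∈ v) (xs : List Int) :
    pvDedup v (x :: xs) = pvDedup v xs := by
  simp only [pvDedup]
  rw [pvContains_eq_true h]
  simp

theorem pvDedup_cons_not_mem {v : PySem.Set Int} {x : Int} (h : x ∉ v) (xs : List Int) :
    pvDedup v (x :: xs) = x :: pvDedup (PySem.Set.add v x) xs := by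
  simp only [pvDedup]
  rw [pvContains_eq_false h]
  simp

theorem pvStep_eq : pvStepA = pvStepB := by
  funext g e
  unfold pvStepA pvStepB
  cases h : g.contains e.1 with
  | true => simp [PySem.Dict.setdefault_of_contains, h]
  | false => simp [PySem.Dict.setdefault_of_not_contains, h]

theorem pvNbrs_cons (e : Int × Int × Int) (tl : List (Int × Int × Int)) (n : Int) :
    pvNbrs (e :: tl) n = (if e.1 = n then [e.2.1] else []) ++ pvNbrs tl n := by
  unfold pvNbrs
  by_cases hn : e.1 = n <;> simp [hn]

theorem pvGraph_getD (el : List (Int × Int × Int)) (g : PySem.Dict Int (List Int)) (n : Int) :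
    (el.foldl pvStepA g).getD n [] = g.getD n [] ++ pvNbrs el n := by
  induction el generalizing g with
  | nil => simp [pvNbrs]
  | cons e tl ih =>
    have hstep : (pvStepA g e).getD n [] = g.getD n [] ++ (if e.1 = n then [e.2.1] else []) := by
      unfold pvStepA
      cases hc : g.contains e.1 with
      | true =>
        simp only [hc, if_true]
        rw [PySem.Dict.getD_modify]
        by_cases hn : n = e.1
        · subst hn; simp
        · rw [if_neg hn, if_neg (Ne.symm hn)]
          simp
      | false =>
        simp only [hc, Bool.false_eq_true, if_false]
        rw [PySem.Dict.getD_modify]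
        by_cases hn : n = e.1
        · subst hn
          simp [PySem.Dict.getD_insert, PySem.Dict.getD_of_not_contains, hc]
        · rw [if_neg hn, PySem.Dict.getD_insert, if_neg hn, if_neg (Ne.symm hn)]
          simp
    simp only [List.foldl_cons]
    rw [ih (pvStepA g e), hstep, pvNbrs_cons, List.append_assoc]

theorem pvInnerA (node : Int) (v' : PySem.Set Int) (nbrs : List Int)
    (q : List Int) (a : List (Int × Int)) :
    nbrs.foldl (fun (st : List Int × List (Int × Int)) b =>
        (if PySem.Set.contains v' b then st.1 else st.1 ++ [b], st.2 ++ [(node, b)])) (q, a)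
      = (q ++ nbrs.filter (fun b => !PySem.Set.contains v' b),
         a ++ nbrs.map (fun b => (node, b))) := by
  induction nbrs generalizing q a with
  | nil => simp
  | cons b t ih =>
    rw [List.foldl_cons]
    by_cases hb : b ∈ v'
    · simp only [pvContains_eq_true hb, if_true]
      rw [ih]
      simp [List.filter_cons, pvContains_eq_true hb, List.append_assoc]
      exact hb
    · simp only [pvContains_eq_false hb, Bool.false_eq_true, if_false]
      rw [ih]
      simp [List.filter_cons, pvContains_eq_false hb, List.append_assoc]
      exact hb

theorem pvInnerB (nbrs : List Int) : ∀ (q : List Int) (s : PySem.Set Int),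
    nbrs.foldl (fun (st : List Int × PySem.Set Int) nb =>
        if PySem.Set.contains st.2 nb then st else (st.1 ++ [nb], PySem.Set.add st.2 nb)) (q, s)
      = (q ++ pvDedup s nbrs, PySem.Set.update s nbrs) := by
  induction nbrs with
  | nil => intro q s; simp [pvDedup, PySem.Set.update_nil]
  | cons b t ih =>
    intro q s
    by_cases hm : b ∈ s
    · rw [List.foldl_cons]
      simp only [pvContains_eq_true hm, if_true]
      rw [ih, PySem.Set.update_cons, PySem.Set.add_of_mem hm, pvDedup_cons_mem hm]
    · rw [List.foldl_cons]
      simp only [pvContains_eq_false hm, Bool.false_eq_true, if_false]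
      rw [ih, PySem.Set.update_cons, pvDedup_cons_not_mem hm]
      simp [List.append_assoc]

theorem pvLoopB_acc (graph : PySem.Dict Int (List Int)) (k : Int) :
    ∀ (f : Nat) (q : List Int) (s : PySem.Set Int) (ord : List Int) (cnt : Int),
    pvLoopB graph k f q s ord cnt = ord ++ pvLoopB graph k f q s [] cnt := by
  intro f
  induction f with
  | zero => intro q s ord cnt; simp [pvLoopB]
  | succ f ih =>
    intro q s ord cnt
    cases q with
    | nil => simp [pvLoopB]
    | cons n rest =>
      by_cases hk : cnt < k
      · simp only [pvLoopB, hk, if_true, List.nil_append]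
        rw [ih _ _ (ord ++ [n]), ih _ _ [n]]
        simp [List.append_assoc]
      · simp [pvLoopB, hk]

theorem pvDedup_append (xs ys : List Int) : ∀ (v : PySem.Set Int),
    pvDedup v (xs ++ ys) = pvDedup v xs ++ pvDedup (PySem.Set.update v xs) ys := by
  induction xs with
  | nil => intro v; simp [pvDedup, PySem.Set.update_nil]
  | cons x t ih =>
    intro v
    by_cases hm : x ∈ v
    · rw [List.cons_append, pvDedup_cons_mem hm, pvDedup_cons_mem hm, ih,
        PySem.Set.update_cons, PySem.Set.add_of_mem hm]
    · rw [List.cons_append, pvDedup_cons_not_mem hm, pvDedup_cons_not_mem hm, ih,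
        PySem.Set.update_cons, List.cons_append]

theorem pvDedup_congr (l : List Int) : ∀ (v w : PySem.Set Int), (∀ x, x ∈ v ↔ x ∈ w) →
    pvDedup v l = pvDedup w l := by
  induction l with
  | nil => intro v w h; rfl
  | cons x t ih =>
    intro v w h
    by_cases hx : x ∈ v
    · rw [pvDedup_cons_mem hx, pvDedup_cons_mem ((h x).mp hx)]
      exact ih v w h
    · rw [pvDedup_cons_not_mem hx, pvDedup_cons_not_mem (fun hw => hx ((h x).mpr hw))]
      refine congrArg _ (ih _ _ ?_)
      intro y
      simp [PySem.Set.mem_add, h y]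

theorem pvDedup_filter (l : List Int) (v' : PySem.Set Int) : ∀ (s : PySem.Set Int),
    (∀ b, b ∈ v' → b ∈ s) →
    pvDedup s (l.filter (fun b => !PySem.Set.contains v' b)) = pvDedup s l := by
  induction l with
  | nil => intro s h; rfl
  | cons b t ih =>
    intro s h
    by_cases hb : b ∈ v'
    · rw [List.filter_cons_of_neg (by simpa using hb)]
      rw [ih s h, pvDedup_cons_mem (h b hb)]
    · rw [List.filter_cons_of_pos (by simpa using hb)]
      by_cases hs : b ∈ s
      · rw [pvDedup_cons_mem hs, pvDedup_cons_mem hs]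
        exact ih s h
      · rw [pvDedup_cons_not_mem hs, pvDedup_cons_not_mem hs]
        refine congrArg _ (ih _ ?_)
        intro b' hb'
        simp only [PySem.Set.mem_add]
        exact Or.inl (h b' hb')

theorem pvCountP_add (el : List (Int × Int × Int)) (v : PySem.Set Int) (a : Int) (ha : a ∉ v) :
    el.countP (fun e => !PySem.Set.contains (PySem.Set.add v a) e.1) + (pvNbrs el a).length
      = el.countP (fun e => !PySem.Set.contains v e.1) := by
  induction el with
  | nil => simp [pvNbrs]
  | cons e t ih =>
    rw [List.countP_cons, List.countP_cons, pvNbrs_cons]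
    by_cases he : e.1 = a
    · have c1 : PySem.Set.contains (PySem.Set.add v a) e.1 = true := by
        refine pvContains_eq_true ?_
        rw [he]; simp [PySem.Set.mem_add]
      have c2 : PySem.Set.contains v e.1 = false := by
        refine pvContains_eq_false ?_
        rw [he]; exact ha
      simp only [c1, c2, Bool.not_true, Bool.not_false, if_pos he, Bool.false_eq_true,
        if_false, eq_self_iff_true, if_true, List.length_append, List.length_cons,
        List.length_nil]
      omega
    · have c1 : PySem.Set.contains (PySem.Set.add v a) e.1 = PySem.Set.contains v e.1 := by
        by_cases hm : e.1 ∈ v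
        · rw [pvContains_eq_true hm, pvContains_eq_true (by simp [PySem.Set.mem_add, hm])]
        · rw [pvContains_eq_false hm, pvContains_eq_false (by simp [PySem.Set.mem_add, hm, he])]
      simp only [c1, if_neg he, List.length_append, List.length_nil]
      omega

theorem pvLen_add (v : PySem.Set Int) (a : Int) (ha : a ∉ v) :
    PySem.Set.len (PySem.Set.add v a) = PySem.Set.len v + 1 := by
  simp [PySem.Set.len, PySem.Set.add_of_not_mem ha]

theorem pvEmit_fold (graph : PySem.Dict Int (List Int)) (ord : List Int) :
    ∀ (acc : List (Int × Int)),
    ord.foldl (fun acc node =>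
        (PySem.Dict.getD graph node []).foldl (fun a nb => a ++ [(node, nb)]) acc) acc
      = acc ++ pvEmit graph ord := by
  induction ord with
  | nil => intro acc; simp [pvEmit]
  | cons n t ih =>
    intro acc
    simp only [List.foldl_cons]
    rw [PySem.List.foldl_append_singleton_eq_map, ih]
    simp [pvEmit, List.append_assoc]

theorem pvLoopA_nil (graph : PySem.Dict Int (List Int)) (k : Int) (fA : Nat)
    (v sn : PySem.Set Int) (e : List (Int × Int)) :
    pvLoopA graph k fA [] v sn e = e := by
  cases fA <;> simp [pvLoopA]

theorem pvLoopB_nil (graph : PySem.Dict Int (List Int)) (k : Int) (fB : Nat)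
    (s : PySem.Set Int) (ord : List Int) (cnt : Int) :
    pvLoopB graph k fB [] s ord cnt = ord := by
  cases fB <;> simp [pvLoopB]

theorem pvMain (el : List (Int × Int × Int)) (k : Int)
    (graph : PySem.Dict Int (List Int)) (hg : graph = el.foldl pvStepA PySem.Dict.empty) :
    ∀ (N : Nat) (qA : List Int) (v : PySem.Set Int) (qB : List Int) (seen : PySem.Set Int)
      (cnt : Int) (e : List (Int × Int)) (fA fB : Nat),
      pvPhi el qA v ≤ N →
      qB = pvDedup v qA →
      (∀ x, x ∈ seen ↔ (x ∈ v ∨ x ∈ qA)) →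
      cnt = (PySem.Set.len v : Int) →
      pvPhi el qA v ≤ fA → pvPhi el qA v ≤ fB →
      pvLoopA graph k fA qA v v e = e ++ pvEmit graph (pvLoopB graph k fB qB seen [] cnt) := by
  intro N
  induction N with
  | zero =>
    intro qA v qB seen cnt e fA fB hN hqB hseen hcnt hfA hfB
    have hq : qA = [] := by
      have h1 : qA.length = 0 := by unfold pvPhi at hN; omega
      exact List.eq_nil_of_length_eq_zero h1
    subst hq
    have hqBnil : qB = [] := by rw [hqB]; rfl
    subst hqBnil
    rw [pvLoopA_nil, pvLoopB_nil]
    simp [pvEmit]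
  | succ N ihN =>
    intro qA v qB seen cnt e fA fB hN hqB hseen hcnt hfA hfB
    cases qA with
    | nil =>
      have hqBnil : qB = [] := by rw [hqB]; rfl
      subst hqBnil
      rw [pvLoopA_nil, pvLoopB_nil]
      simp [pvEmit]
    | cons a rest =>
      have hlen1 : 1 ≤ pvPhi el (a :: rest) v := by
        unfold pvPhi; simp; omega
      obtain ⟨fA', rfl⟩ : ∃ m, fA = m + 1 := ⟨fA - 1, by omega⟩
      obtain ⟨fB', rfl⟩ : ∃ m, fB = m + 1 := ⟨fB - 1, by omega⟩
      by_cases hk : ((PySem.Set.len v : Int) < k)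
      · by_cases hva : a ∈ v
        · -- a already visited: A skips it, B's queue never contained it
          have hA : pvLoopA graph k (fA' + 1) (a :: rest) v v e
              = pvLoopA graph k fA' rest v v e := by
            simp only [pvLoopA]
            rw [if_pos hk, pvContains_eq_true hva]
            simp
          have hphi : pvPhi el rest v + 1 = pvPhi el (a :: rest) v := by
            unfold pvPhi; simp; omega
          rw [hA]
          refine ihN rest v qB seen cnt e fA' (fB' + 1) (by omega) ?_ ?_ hcnt (by omega) (by omega)
          · rw [hqB, pvDedup_cons_mem hva]
          · intro x
            rw [hseen x]
            simp only [List.mem_cons]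
            constructor
            · rintro (h | h | h)
              · exact Or.inl h
              · exact Or.inl (h ▸ hva)
              · exact Or.inr h
            · rintro (h | h)
              · exact Or.inl h
              · exact Or.inr (Or.inr h)
        · -- a is processed now, by both loops
          have hnotv : PySem.Set.contains v a = false := pvContains_eq_false hva
          have hnb : PySem.Dict.getD graph a [] = pvNbrs el a := by
            rw [hg, pvGraph_getD]
            simp [PySem.Dict.getD_empty]
          have hA : pvLoopA graph k (fA' + 1) (a :: rest) v v e
              = pvLoopA graph k fA'
                  (rest ++ (pvNbrs el a).filter (fun b => !PySem.Set.contains (PySem.Set.add v a) b))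
                  (PySem.Set.add v a) (PySem.Set.add v a)
                  (e ++ (pvNbrs el a).map (fun b => (a, b))) := by
            simp only [pvLoopA]
            rw [if_pos hk, hnotv]
            simp only [Bool.false_eq_true, if_false]
            cases hga : PySem.Dict.get? graph a with
            | none =>
              have hempty : pvNbrs el a = [] := by
                rw [← hnb]
                simp [PySem.Dict.getD_eq_get?_getD, hga]
              simp [hempty]
            | some l =>
              have hl : l = pvNbrs el a := by
                rw [← hnb]
                simp [PySem.Dict.getD_eq_get?_getD, hga]
              subst hl
              simp only []
              rw [pvInnerA]
          have hcntk : cnt < k := by rw [hcnt]; exact hk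
          have hB : pvLoopB graph k (fB' + 1) qB seen [] cnt
              = [a] ++ pvLoopB graph k fB'
                  (pvDedup (PySem.Set.add v a) rest ++ pvDedup seen (pvNbrs el a))
                  (PySem.Set.update seen (pvNbrs el a)) [] (cnt + 1) := by
            rw [hqB, pvDedup_cons_not_mem hva]
            simp only [pvLoopB]
            rw [if_pos hcntk, hnb, pvInnerB]
            simp only [List.nil_append]
            rw [pvLoopB_acc]
          rw [hA, hB]
          have hemit : pvEmit graph ([a] ++ pvLoopB graph k fB'
                  (pvDedup (PySem.Set.add v a) rest ++ pvDedup seen (pvNbrs el a))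
                  (PySem.Set.update seen (pvNbrs el a)) [] (cnt + 1))
              = (pvNbrs el a).map (fun b => (a, b)) ++ pvEmit graph (pvLoopB graph k fB'
                  (pvDedup (PySem.Set.add v a) rest ++ pvDedup seen (pvNbrs el a))
                  (PySem.Set.update seen (pvNbrs el a)) [] (cnt + 1)) := by
            simp [pvEmit, hnb]
          rw [hemit]
          have hdec : pvPhi el
              (rest ++ (pvNbrs el a).filter (fun b => !PySem.Set.contains (PySem.Set.add v a) b))
              (PySem.Set.add v a) + 1 ≤ pvPhi el (a :: rest) v := by
            have h1 := pvCountP_add el v a hva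
            have h2 : ((pvNbrs el a).filter
                (fun b => !PySem.Set.contains (PySem.Set.add v a) b)).length
                ≤ (pvNbrs el a).length := List.length_filter_le _ _
            unfold pvPhi at *
            simp only [List.length_append, List.length_cons]
            omega
          have hsub : ∀ x, x ∈ PySem.Set.update (PySem.Set.add v a) rest ↔ x ∈ seen := by
            intro x
            rw [PySem.Set.mem_update, PySem.Set.mem_add, hseen x]
            simp only [List.mem_cons]
            tauto
          have hq2 : pvDedup (PySem.Set.add v a) rest ++ pvDedup seen (pvNbrs el a)
              = pvDedup (PySem.Set.add v a)
                  (rest ++ (pvNbrs el a).filter (fun b => !PySem.Set.contains (PySem.Set.add v a) b)) := by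
            rw [pvDedup_append]
            congr 1
            rw [pvDedup_filter _ _ _ (fun b hb => by
              rw [PySem.Set.mem_update]
              exact Or.inl hb)]
            exact (pvDedup_congr _ _ _ hsub).symm
          have hseen2 : ∀ x, x ∈ PySem.Set.update seen (pvNbrs el a) ↔
              (x ∈ PySem.Set.add v a ∨ x ∈ rest ++ (pvNbrs el a).filter
                (fun b => !PySem.Set.contains (PySem.Set.add v a) b)) := by
            intro x
            rw [PySem.Set.mem_update, hseen x, PySem.Set.mem_add, List.mem_append,
              List.mem_filter]
            simp only [List.mem_cons, Bool.not_eq_eq_eq_not, Bool.not_true]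
            by_cases hxv : x ∈ PySem.Set.add v a
            · have : x ∈ v ∨ x = a := (PySem.Set.mem_add v a x).mp hxv
              tauto
            · have hxc : PySem.Set.contains (PySem.Set.add v a) x = false :=
                pvContains_eq_false hxv
              have : ¬ (x ∈ v ∨ x = a) := fun h => hxv ((PySem.Set.mem_add v a x).mpr h)
              tauto
          have hcnt2 : cnt + 1 = (PySem.Set.len (PySem.Set.add v a) : Int) := by
            rw [pvLen_add v a hva]
            omega
          have key := ihN
            (rest ++ (pvNbrs el a).filter (fun b => !PySem.Set.contains (PySem.Set.add v a) b))
            (PySem.Set.add v a)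
            (pvDedup (PySem.Set.add v a) rest ++ pvDedup seen (pvNbrs el a))
            (PySem.Set.update seen (pvNbrs el a))
            (cnt + 1)
            (e ++ (pvNbrs el a).map (fun b => (a, b)))
            fA' fB' (by omega) hq2 hseen2 hcnt2 (by omega) (by omega)
          rw [key, List.append_assoc]
      · -- count limit reached: both loops stop
        have hA : pvLoopA graph k (fA' + 1) (a :: rest) v v e = e := by
          simp only [pvLoopA]
          rw [if_neg hk]
        have hB : pvLoopB graph k (fB' + 1) qB seen [] cnt = [] := by
          cases qB with
          | nil => simp [pvLoopB]
          | cons b tb =>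
            have : ¬ (cnt < k) := by rw [hcnt]; exact hk
            simp [pvLoopB, this]
        rw [hA, hB]
        simp [pvEmit]

-- ===== VERDICT (by name: the statement is the Claim_ definition above) =====
theorem bfs_subgraph_spec : Claim_equal_bfs_subgraph := by
  intro el s k _hdom
  unfold Spec_bfs_subgraph bfs_subgraph bfs_subgraph_alt
  rw [← pvStep_eq]
  rw [pvEmit_fold]
  simp only [List.nil_append]
  have hN : pvPhi el [s] PySem.Set.empty ≤ el.length + 1 := by
    unfold pvPhi
    have := List.countP_le_length (l := el) (p := fun e => !PySem.Set.contains PySem.Set.empty e.1)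
    simp only [List.length_cons, List.length_nil]
    omega
  refine pvMain el k _ rfl (el.length + 1) [s] PySem.Set.empty [s]
    (PySem.Set.add PySem.Set.empty s) 0 [] (el.length + 1) (el.length + 1) hN ?_ ?_ ?_ hN hN
  · rw [pvDedup_cons_not_mem (by exact List.not_mem_nil)]
    rfl
  · intro x
    simp [PySem.Set.mem_add, PySem.Set.empty]
  · rfl
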